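-- pv_equiv track=rewrite | github.com/vyv83/leadlag-lab | leadlag/analysis/detection.py | cluster_events_first
-- ===== SOURCE A (Python) =====
-- def cluster_events_first(events: list[dict], gap_bins: int = 60) -> list[dict]:
--     if not events:
--         return []
--     sorted_ev = sorted(events, key=lambda e: e["bin_idx"])
--     clusters, current = [], [sorted_ev[0]]
--     for ev in sorted_ev[1:]:
--         if ev["bin_idx"] - current[-1]["bin_idx"] <= gap_bins:
--             current.append(ev)
--         else:
--             clusters.append(current)
--             current = [ev]
--     clusters.append(current)
--     return [cl[0] for cl in clusters]
-- ===== SOURCE B (Python) =====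
-- def cluster_events_first(events: list[dict], gap_bins: int = 60) -> list[dict]:
--     # Same result by a direct scan: keep sorted_ev[0] and every event whose
--     # bin_idx exceeds its immediate predecessor's by more than gap_bins;
--     # no cluster lists or 'current' accumulator are built.
--     sorted_ev = sorted(events, key=lambda e: e["bin_idx"])
--     if not sorted_ev:
--         return []
--     return [sorted_ev[0]] + [ev for prev, ev in zip(sorted_ev, sorted_ev[1:])
--                              if ev["bin_idx"] - prev["bin_idx"] > gap_bins]
-- ===== Notes on version B (the rewrite author's own statement) =====
-- stated objective: simpler
-- what changed: Replaces the cluster-list/current-accumulator loop with a direct one-pass scan over adjacent pairs of the sorted list that emits the first element and every event whose bin_idx gap to its predecessor exceeds gap_bins; no intermediate cluster lists are materialised.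
import Mathlib
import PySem

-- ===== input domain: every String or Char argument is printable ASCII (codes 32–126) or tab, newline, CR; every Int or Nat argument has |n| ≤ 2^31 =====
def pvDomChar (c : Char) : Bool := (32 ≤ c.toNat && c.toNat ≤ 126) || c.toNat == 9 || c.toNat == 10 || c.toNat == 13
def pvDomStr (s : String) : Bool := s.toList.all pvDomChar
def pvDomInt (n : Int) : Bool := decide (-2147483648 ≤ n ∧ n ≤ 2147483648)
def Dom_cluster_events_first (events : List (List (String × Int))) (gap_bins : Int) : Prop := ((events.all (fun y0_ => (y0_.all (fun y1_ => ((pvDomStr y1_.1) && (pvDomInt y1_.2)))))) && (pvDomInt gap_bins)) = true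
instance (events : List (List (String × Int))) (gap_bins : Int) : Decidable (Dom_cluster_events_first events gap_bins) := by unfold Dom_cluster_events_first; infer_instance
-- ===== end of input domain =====

-- B replaces A's cluster/current accumulator with a direct adjacent-pair scan of the sorted list (objective: simpler).


-- ===== PORT A =====
-- e["bin_idx"]: dict lookup = first match in the association list; 0 default is only
-- reached outside Pre_ (Python raises KeyError there).
def pvKeyD (e : List (String × Int)) : Int :=
  ((e.find? (fun p => p.1 == "bin_idx")).map Prod.snd).getD 0

def cluster_events_first (events : List (List (String × Int))) (gap_bins : Int) : List (List (String × Int)) :=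
  if events = [] then []
  else
    let sorted_ev := PySem.List.sorted events (fun e => pvKeyD e) false
    let st := (sorted_ev.drop 1).foldl
      (fun (st : List (List (List (String × Int))) × List (List (String × Int))) ev =>
        if pvKeyD ev - pvKeyD (PySem.List.pyGetD st.2 (-1) []) ≤ gap_bins then
          (st.1, st.2 ++ [ev])
        else
          (st.1 ++ [st.2], [ev]))
      ([], [PySem.List.pyGetD sorted_ev 0 []])
    (st.1 ++ [st.2]).map (fun cl => PySem.List.pyGetD cl 0 [])

-- ===== PORT B =====
def cluster_events_first_alt (events : List (List (String × Int))) (gap_bins : Int) : List (List (String × Int)) :=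
  match PySem.List.sorted events (fun e => pvKeyD e) false with
  | [] => []
  | first :: rest =>
      first :: ((first :: rest).zip rest).filterMap
        (fun pe => if pvKeyD pe.2 - pvKeyD pe.1 > gap_bins then some pe.2 else none)

-- ===== PRECONDITION & SPEC =====
-- Pre_ excludes exactly the inputs where A raises KeyError: an event without a "bin_idx" key.
def Pre_cluster_events_first (events : List (List (String × Int))) (gap_bins : Int) : Prop :=
  events.all (fun e => (e.find? (fun p => p.1 == "bin_idx")).isSome) = true

instance (events : List (List (String × Int))) (gap_bins : Int) : Decidable (Pre_cluster_events_first events gap_bins) := by unfold Pre_cluster_events_first; infer_instance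

def pvWitness_cluster_events_first : (List (List (String × Int))) × Int :=
  ([[("bin_idx", 3)], [("bin_idx", 100), ("tag", 1)], [("bin_idx", 10)]], 60)

def Spec_cluster_events_first (events : List (List (String × Int))) (gap_bins : Int) (out : List (List (String × Int))) : Prop := out = cluster_events_first_alt events gap_bins
instance (events : List (List (String × Int))) (gap_bins : Int) (out : List (List (String × Int))) : Decidable (Spec_cluster_events_first events gap_bins out) := by unfold Spec_cluster_events_first; infer_instance

-- ===== CLAIM (what is proved, stated in full; the proofs are below) =====
def Claim_equal_cluster_events_first : Prop := ∀ (events : List (List (String × Int))) (gap_bins : Int), Dom_cluster_events_first events gap_bins → Pre_cluster_events_first events gap_bins → Spec_cluster_events_first events gap_bins (cluster_events_first events gap_bins)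

-- ===== LEMMAS AND PROOFS =====

-- the events B keeps after a predecessor p while scanning xs
def pvPicks (g : Int) (p : List (String × Int)) : List (List (String × Int)) → List (List (String × Int))
  | [] => []
  | e :: t => (if pvKeyD e - pvKeyD p > g then [e] else []) ++ pvPicks g e t

lemma zip_filterMap_eq_picks (g : Int) (p : List (String × Int)) (xs : List (List (String × Int))) :
    ((p :: xs).zip xs).filterMap
        (fun pe => if pvKeyD pe.2 - pvKeyD pe.1 > g then some pe.2 else none)
      = pvPicks g p xs := by
  induction xs generalizing p with
  | nil => simp [pvPicks]
  | cons e t ih =>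
      simp only [List.zip_cons_cons, List.filterMap_cons, pvPicks, ← ih e]
      split_ifs <;> simp

lemma head0_append_singleton (cur : List (List (String × Int))) (e : List (String × Int))
    (h : cur ≠ []) :
    PySem.List.pyGetD (cur ++ [e]) 0 ([] : List (String × Int)) = PySem.List.pyGetD cur 0 [] := by
  cases cur with
  | nil => exact absurd rfl h
  | cons a t => simp [PySem.List.pyGetD_zero_cons, List.cons_append]

lemma loopA (g : Int) (xs : List (List (String × Int)))
    (cs : List (List (List (String × Int)))) (cur : List (List (String × Int)))
    (hcur : cur ≠ []) :
    (((xs.foldl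
      (fun (st : List (List (List (String × Int))) × List (List (String × Int))) ev =>
        if pvKeyD ev - pvKeyD (PySem.List.pyGetD st.2 (-1) []) ≤ g then
          (st.1, st.2 ++ [ev])
        else
          (st.1 ++ [st.2], [ev]))
      (cs, cur)).1 ++ [(xs.foldl
      (fun (st : List (List (List (String × Int))) × List (List (String × Int))) ev =>
        if pvKeyD ev - pvKeyD (PySem.List.pyGetD st.2 (-1) []) ≤ g then
          (st.1, st.2 ++ [ev])
        else
          (st.1 ++ [st.2], [ev]))
      (cs, cur)).2]).map (fun cl => PySem.List.pyGetD cl 0 []))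
    = ((cs ++ [cur]).map (fun cl => PySem.List.pyGetD cl 0 []))
        ++ pvPicks g (PySem.List.pyGetD cur (-1) []) xs := by
  induction xs generalizing cs cur with
  | nil => simp [pvPicks]
  | cons e t ih =>
      simp only [List.foldl_cons, pvPicks]
      by_cases hle : pvKeyD e - pvKeyD (PySem.List.pyGetD cur (-1) []) ≤ g
      · rw [if_pos hle]
        have h2 : cur ++ [e] ≠ [] := by simp
        rw [ih cs (cur ++ [e]) h2]
        rw [PySem.List.pyGetD_neg_one_append_singleton]
        have : ¬ (pvKeyD e - pvKeyD (PySem.List.pyGetD cur (-1) []) > g) := by omega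
        rw [if_neg this]
        simp [head0_append_singleton cur e hcur]
      · rw [if_neg hle]
        have h2 : ([e] : List (List (String × Int))) ≠ [] := by simp
        rw [ih (cs ++ [cur]) [e] h2]
        have : pvKeyD e - pvKeyD (PySem.List.pyGetD cur (-1) []) > g := by omega
        rw [if_pos this]
        rw [show ([e] : List (List (String × Int))) = [] ++ [e] from rfl,
            PySem.List.pyGetD_neg_one_append_singleton]
        simp [PySem.List.pyGetD_zero_cons]

-- ===== VERDICT (by name: the statement is the Claim_ definition above) =====
theorem cluster_events_first_spec : Claim_equal_cluster_events_first := by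
  intro events gap_bins _ _
  unfold Spec_cluster_events_first cluster_events_first cluster_events_first_alt
  by_cases hev : events = []
  · subst hev; simp [PySem.List.sorted]
  · rw [if_neg hev]
    have hs : PySem.List.sorted events (fun e => pvKeyD e) false ≠ [] := by
      rw [Ne, PySem.List.sorted_eq_nil_iff]; exact hev
    rcases hfr : PySem.List.sorted events (fun e => pvKeyD e) false with _ | ⟨first, rest⟩
    · exact absurd hfr hs
    · simp only [List.drop_one, List.tail_cons]
      rw [loopA gap_bins rest [] [PySem.List.pyGetD (first :: rest) 0 []] (by simp)]
      simp only [PySem.List.pyGetD_zero_cons]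
      rw [show ([first] : List (List (String × Int))) = [] ++ [first] from rfl,
          PySem.List.pyGetD_neg_one_append_singleton, zip_filterMap_eq_picks]
      simp [PySem.List.pyGetD_zero_cons]
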